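-- pv_equiv track=rewrite | github.com/pr28416/parsel_coq | programs/problem_solving.py | sky_city_cost
-- ===== SOURCE A (Python) =====
-- def sky_city_cost(city_road_cost, city_airport_cost):
--     sky_cost = [[0] * (len(city_road_cost) + 1) for _ in range(len(city_road_cost) + 1)]
--     for i in range(len(city_road_cost)):
--         for j in range(len(city_road_cost)):
--             sky_cost[i][j] = city_road_cost[i][j]
--             sky_cost[i][-1] = city_airport_cost[i]
--             sky_cost[-1][j] = city_airport_cost[j]
--     return sky_cost
-- ===== SOURCE B (Python) =====
-- def sky_city_cost(city_road_cost, city_airport_cost):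
--     n = len(city_road_cost)
--
--     def cell(r, c):
--         # closed-form value of the augmented matrix at (r, c)
--         if r < n and c < n:
--             return city_road_cost[r][c]
--         if c == n and r < n:
--             return city_airport_cost[r]
--         if r == n and c < n:
--             return city_airport_cost[c]
--         return 0
--
--     flat = [cell(k // (n + 1), k % (n + 1)) for k in range((n + 1) * (n + 1))]
--     return [flat[r * (n + 1):(r + 1) * (n + 1)] for r in range(n + 1)]
-- ===== Notes on version B (the rewrite author's own statement) =====
-- stated objective: alternative
-- what changed: A preallocates an (n+1)x(n+1) zero matrix and fills it by nested in-place element writes (re-writing the border cells n times); B instead defines the matrix by a closed-form per-cell function of the coordinates, materialises it as one flat list over linear indices via divmod, and chunks that flat list into rows by slicing.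
import Mathlib
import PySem

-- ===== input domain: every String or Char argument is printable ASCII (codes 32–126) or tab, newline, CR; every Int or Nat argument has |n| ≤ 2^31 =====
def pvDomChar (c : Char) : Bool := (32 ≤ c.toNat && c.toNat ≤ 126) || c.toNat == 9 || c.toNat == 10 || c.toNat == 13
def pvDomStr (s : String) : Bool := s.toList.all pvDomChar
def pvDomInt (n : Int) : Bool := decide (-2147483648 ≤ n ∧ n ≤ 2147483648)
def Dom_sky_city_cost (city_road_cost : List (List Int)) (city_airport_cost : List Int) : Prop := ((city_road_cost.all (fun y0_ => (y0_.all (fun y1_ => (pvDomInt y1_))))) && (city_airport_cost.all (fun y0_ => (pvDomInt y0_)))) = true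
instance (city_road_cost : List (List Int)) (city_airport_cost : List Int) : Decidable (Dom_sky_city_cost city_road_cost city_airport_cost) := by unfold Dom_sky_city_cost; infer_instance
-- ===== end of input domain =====

-- B replaces A's zero-matrix allocation filled by nested in-place writes with a closed-form
-- per-cell function materialised as one flat list over linear indices, chunked into rows.

-- ===== PORT A =====
-- sky_cost[i][j] = v : List.modify at row i, List.set at column j.
-- Every row of sky_cost always has length n+1, so Python's index -1 is index n.
-- Under Pre_ the getD defaults are never taken (all accesses are in range).
def pvSet2 (m : List (List Int)) (i j : Nat) (v : Int) : List (List Int) :=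
  m.modify i (fun row => row.set j v)

def sky_city_cost (city_road_cost : List (List Int)) (city_airport_cost : List Int) : List (List Int) :=
  let n := city_road_cost.length
  (List.range n).foldl (fun m i =>
    (List.range n).foldl (fun m j =>
      pvSet2 (pvSet2 (pvSet2 m i j ((city_road_cost.getD i []).getD j 0))
                i n (city_airport_cost.getD i 0))
        n j (city_airport_cost.getD j 0)) m)
    (List.replicate (n+1) (List.replicate (n+1) (0:Int)))

-- ===== PORT B =====
-- cell(r, c) from Source B; under Pre_ the getD defaults are never taken.
def pvCell (city_road_cost : List (List Int)) (city_airport_cost : List Int)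
    (n r c : Nat) : Int :=
  if r < n ∧ c < n then (city_road_cost.getD r []).getD c 0
  else if c = n ∧ r < n then city_airport_cost.getD r 0
  else if r = n ∧ c < n then city_airport_cost.getD c 0
  else 0

-- k // (n+1) and k % (n+1) on the nonnegative range index k with positive divisor are
-- exactly Nat division/mod; flat[r*(n+1):(r+1)*(n+1)] with natural bounds is drop/take
-- (PySem.List.slice_natCast_add).
def sky_city_cost_alt (city_road_cost : List (List Int)) (city_airport_cost : List Int) : List (List Int) :=
  let n := city_road_cost.length
  let flat := (List.range ((n+1)*(n+1))).map
    (fun k => pvCell city_road_cost city_airport_cost n (k / (n+1)) (k % (n+1)))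
  (List.range (n+1)).map (fun r => (flat.drop (r*(n+1))).take (n+1))

-- ===== PRECONDITION & SPEC =====
-- Pre_ excludes exactly the inputs where A raises IndexError: a road row shorter than
-- len(city_road_cost), or fewer airport costs than cities.
def Pre_sky_city_cost (city_road_cost : List (List Int)) (city_airport_cost : List Int) : Prop :=
  (∀ row ∈ city_road_cost, city_road_cost.length ≤ row.length) ∧
    city_road_cost.length ≤ city_airport_cost.length
instance (city_road_cost : List (List Int)) (city_airport_cost : List Int) : Decidable (Pre_sky_city_cost city_road_cost city_airport_cost) := by unfold Pre_sky_city_cost; infer_instance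

def pvWitness_sky_city_cost : List (List Int) × List Int := ([[1, 2], [3, 4]], [5, 6])

def Spec_sky_city_cost (city_road_cost : List (List Int)) (city_airport_cost : List Int) (out : List (List Int)) : Prop := out = sky_city_cost_alt city_road_cost city_airport_cost
instance (city_road_cost : List (List Int)) (city_airport_cost : List Int) (out : List (List Int)) : Decidable (Spec_sky_city_cost city_road_cost city_airport_cost out) := by unfold Spec_sky_city_cost; infer_instance

-- ===== CLAIM (what is proved, stated in full; the proofs are below) =====
def Claim_equal_sky_city_cost : Prop := ∀ (city_road_cost : List (List Int)) (city_airport_cost : List Int), Dom_sky_city_cost city_road_cost city_airport_cost → Pre_sky_city_cost city_road_cost city_airport_cost → Spec_sky_city_cost city_road_cost city_airport_cost (sky_city_cost city_road_cost city_airport_cost)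

-- ===== LEMMAS AND PROOFS =====

-- Matrices as tabulations of a function Nat → Nat → Int over range (n+1) × range (n+1).
def toMat (n : Nat) (F : Nat → Nat → Int) : List (List Int) :=
  (List.range (n+1)).map (fun r => (List.range (n+1)).map (F r))

def updF (F : Nat → Nat → Int) (r c : Nat) (v : Int) : Nat → Nat → Int :=
  fun r' c' => if r' = r ∧ c' = c then v else F r' c'

lemma set_map_range (L : Nat) (f : Nat → Int) (c : Nat) (v : Int) :
    ((List.range L).map f).set c v = (List.range L).map (fun c' => if c' = c then v else f c') := by
  apply List.ext_getElem
  · simp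
  · intro t h1 h2
    simp only [List.length_set, List.length_map, List.length_range] at h1
    rw [List.getElem_set]
    simp only [List.getElem_map, List.getElem_range]
    by_cases h : c = t
    · subst h; simp
    · simp [h, Ne.symm h]

lemma set2_toMat (n : Nat) (F : Nat → Nat → Int) (r c : Nat) (v : Int) :
    pvSet2 (toMat n F) r c v = toMat n (updF F r c v) := by
  unfold pvSet2 toMat
  apply List.ext_getElem
  · simp
  · intro t h1 h2
    simp only [List.length_modify, List.length_map, List.length_range] at h1
    rw [List.getElem_modify]
    simp only [List.getElem_map, List.getElem_range]
    by_cases h : r = t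
    · subst h
      rw [if_pos rfl, set_map_range]
      apply List.map_congr_left
      intro c' _
      simp [updF]
    · rw [if_neg h]
      apply List.map_congr_left
      intro c' _
      simp [updF, Ne.symm h]

lemma foldl_toMat (n : Nat) (f : List (List Int) → Nat → List (List Int))
    (g : (Nat → Nat → Int) → Nat → Nat → Nat → Int) :
    ∀ (js : List Nat) (F : Nat → Nat → Int),
      (∀ F' x, x ∈ js → f (toMat n F') x = toMat n (g F' x)) →
      js.foldl f (toMat n F) = toMat n (js.foldl g F) := by
  intro js
  induction js with
  | nil => intro F _; simp
  | cons j js ih =>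
    intro F h
    rw [List.foldl_cons, List.foldl_cons, h F j (List.mem_cons_self ..)]
    exact ih _ (fun F' x hx => h F' x (List.mem_cons_of_mem _ hx))

-- the body of A's inner loop, at the level of functions
def istepF (n : Nat) (Rg : Nat → Nat → Int) (ag : Nat → Int) (i : Nat)
    (F : Nat → Nat → Int) (j : Nat) : Nat → Nat → Int :=
  updF (updF (updF F i j (Rg i j)) i n (ag i)) n j (ag j)

def ostepF (n : Nat) (Rg : Nat → Nat → Int) (ag : Nat → Int)
    (F : Nat → Nat → Int) (i : Nat) : Nat → Nat → Int :=
  (List.range n).foldl (istepF n Rg ag i) F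

-- state of A's matrix after the first k inner iterations of outer iteration i
def inF (n : Nat) (Rg : Nat → Nat → Int) (ag : Nat → Int) (i k : Nat)
    (F : Nat → Nat → Int) : Nat → Nat → Int := fun r c =>
  if r = n ∧ c < k then ag c
  else if 0 < k ∧ r = i ∧ c = n then ag i
  else if r = i ∧ c < k then Rg i c
  else F r c

-- state of A's matrix after the first k outer iterations
def outF (n : Nat) (Rg : Nat → Nat → Int) (ag : Nat → Int) (k : Nat) :
    Nat → Nat → Int := fun r c =>
  if r = n ∧ c < n ∧ 0 < k then ag c
  else if r < k ∧ c = n then ag r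
  else if r < k ∧ c < n then Rg r c
  else 0

lemma innerClosed (n : Nat) (Rg : Nat → Nat → Int) (ag : Nat → Int) (i : Nat) (hi : i < n) :
    ∀ k, k ≤ n → ∀ F, (List.range k).foldl (istepF n Rg ag i) F = inF n Rg ag i k F := by
  intro k
  induction k with
  | zero => intro _ F; funext r c; simp [inF]
  | succ k ih =>
    intro hk F
    rw [List.range_succ, List.foldl_append, ih (by omega) F]
    funext r c
    simp only [List.foldl_cons, List.foldl_nil, istepF, updF, inF]
    split_ifs <;> first | rfl | omega | simp_all

lemma outerClosed (n : Nat) (Rg : Nat → Nat → Int) (ag : Nat → Int) :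
    ∀ k, k ≤ n → (List.range k).foldl (ostepF n Rg ag) (fun _ _ => 0) = outF n Rg ag k := by
  intro k
  induction k with
  | zero => intro _; funext r c; simp [outF]
  | succ k ih =>
    intro hk
    rw [List.range_succ, List.foldl_append, ih (by omega)]
    simp only [List.foldl_cons, List.foldl_nil, ostepF]
    rw [innerClosed n Rg ag k (by omega) n le_rfl]
    funext r c
    simp only [inF, outF]
    split_ifs <;> first | rfl | omega | simp_all

lemma map_range_const {α : Type} (L : Nat) (x : α) :
    (List.range L).map (fun _ => x) = List.replicate L x := by
  apply List.ext_getElem <;> simp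

-- chunking a flat tabulation: the r-th length-L slice of map f over range N
lemma drop_take_map_range (N L r : Nat) (f : Nat → Int) (h : (r+1)*L ≤ N) :
    (((List.range N).map f).drop (r*L)).take L
      = (List.range L).map (fun c => f (r*L + c)) := by
  rw [Nat.add_mul, Nat.one_mul] at h
  apply List.ext_getElem
  · simp; omega
  · intro t h1 h2
    simp only [List.length_take, List.length_drop, List.length_map, List.length_range] at h1
    rw [List.getElem_take, List.getElem_drop, List.getElem_map, List.getElem_range,
      List.getElem_map, List.getElem_range]

lemma flat_divmod (n r c : Nat) (hc : c < n+1) :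
    (r*(n+1)+c) / (n+1) = r ∧ (r*(n+1)+c) % (n+1) = c := by
  constructor
  · rw [Nat.add_comm, Nat.add_mul_div_right _ _ (by omega), Nat.div_eq_of_lt hc]; omega
  · rw [Nat.add_comm, Nat.add_mul_mod_self_right, Nat.mod_eq_of_lt hc]

-- B equals the tabulation of its cell function
lemma alt_eq_toMat (R : List (List Int)) (a : List Int) :
    sky_city_cost_alt R a = toMat R.length (pvCell R a R.length) := by
  unfold sky_city_cost_alt toMat
  set n := R.length
  apply List.map_congr_left
  intro r hr
  rw [List.mem_range] at hr
  rw [drop_take_map_range ((n+1)*(n+1)) (n+1) r _ (by rw [Nat.add_mul, Nat.one_mul]; nlinarith)]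
  apply List.map_congr_left
  intro c hc
  rw [List.mem_range] at hc
  rw [(flat_divmod n r c hc).1, (flat_divmod n r c hc).2]

theorem sky_city_cost_eq_alt (R : List (List Int)) (a : List Int)
    (hpre : Pre_sky_city_cost R a) : sky_city_cost R a = sky_city_cost_alt R a := by
  obtain ⟨hrow, ha⟩ := hpre
  set n := R.length with hn
  set Rg : Nat → Nat → Int := fun i j => (R.getD i []).getD j 0 with hRg
  set ag : Nat → Int := fun i => a.getD i 0 with hag
  have hinit : List.replicate (n+1) (List.replicate (n+1) (0:Int))
      = toMat n (fun _ _ => 0) := by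
    unfold toMat
    rw [show ((List.range (n+1)).map fun r => (List.range (n+1)).map ((fun (_ _ : Nat) => (0:Int)) r))
        = (List.range (n+1)).map fun _ => List.replicate (n+1) (0:Int) from by
      apply List.map_congr_left; intro r _; exact map_range_const (n+1) 0]
    rw [show ((List.range (n+1)).map fun _ => List.replicate (n+1) (0:Int))
        = List.replicate (n+1) (List.replicate (n+1) (0:Int)) from map_range_const ..]
  have hA : sky_city_cost R a = toMat n (outF n Rg ag n) := by
    show (List.range n).foldl _ _ = _
    rw [hinit, foldl_toMat n _ (ostepF n Rg ag), outerClosed n Rg ag n le_rfl]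
    intro F' i hi
    rw [List.mem_range] at hi
    show (List.range n).foldl _ (toMat n F') = toMat n ((List.range n).foldl (istepF n Rg ag i) F')
    apply foldl_toMat
    intro F'' j hj
    rw [List.mem_range] at hj
    show pvSet2 (pvSet2 (pvSet2 (toMat n F'') i j (Rg i j)) i n (ag i)) n j (ag j) = _
    rw [set2_toMat n F'' i j _, set2_toMat n _ i n _, set2_toMat n _ n j _]
    rfl
  rw [hA, alt_eq_toMat]
  unfold toMat
  apply List.map_congr_left
  intro r hr
  rw [List.mem_range] at hr
  apply List.map_congr_left
  intro c hc
  rw [List.mem_range] at hc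
  show outF n Rg ag n r c = pvCell R a n r c
  simp only [outF, pvCell, hRg, hag]
  split_ifs <;> first | rfl | omega

-- ===== VERDICT (by name: the statement is the Claim_ definition above) =====
theorem sky_city_cost_spec : Claim_equal_sky_city_cost := by
  intro R a _ hpre
  show sky_city_cost R a = sky_city_cost_alt R a
  exact sky_city_cost_eq_alt R a hpre
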